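-- pv_equiv track=rewrite | github.com/abersnaze/contest | src/advent_of_code/y2023/d12/part1.py | premute
-- ===== SOURCE A (Python) =====
-- def premute(constraints, start_at=0):
--     if start_at >= len(constraints):
--         yield constraints
--         return
--     if constraints[start_at] == "?":
--         yield from premute(constraints.replace("?", "#", 1), start_at + 1)
--         yield from premute(constraints.replace("?", "_", 1), start_at + 1)
--         return
--     if constraints[start_at] == ".":
--         yield from premute(constraints.replace(".", "_", 1), start_at + 1)
--     if constraints[start_at] == "#":
--         yield from premute(constraints, start_at + 1)
-- ===== SOURCE B (Python) =====
-- def _expand(s, i):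
--     c = s[i]
--     if c == "?":
--         return [s.replace("?", "#", 1), s.replace("?", "_", 1)]
--     if c == ".":
--         return [s.replace(".", "_", 1)]
--     if c == "#":
--         return [s]
--     return []
--
-- def premute(constraints, start_at=0):
--     # Level-by-level BFS: expand the whole frontier one position per generation.
--     # All states advance in lockstep, so the final frontier equals A's DFS yield order.
--     frontier = [constraints]
--     for i in range(start_at, len(constraints)):
--         frontier = [t for s in frontier for t in _expand(s, i)]
--     yield from frontier
-- ===== Notes on version B (the rewrite author's own statement) =====
-- stated objective: alternative
-- what changed: Replaces A's recursive generator (depth-first, two yield-from calls per '?') by a level-by-level BFS: a frontier list of strings is expanded one position per generation with a list comprehension, and the final frontier is yielded; lockstep advancement makes the frontier order coincide with A's DFS yield order.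
import Mathlib
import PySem

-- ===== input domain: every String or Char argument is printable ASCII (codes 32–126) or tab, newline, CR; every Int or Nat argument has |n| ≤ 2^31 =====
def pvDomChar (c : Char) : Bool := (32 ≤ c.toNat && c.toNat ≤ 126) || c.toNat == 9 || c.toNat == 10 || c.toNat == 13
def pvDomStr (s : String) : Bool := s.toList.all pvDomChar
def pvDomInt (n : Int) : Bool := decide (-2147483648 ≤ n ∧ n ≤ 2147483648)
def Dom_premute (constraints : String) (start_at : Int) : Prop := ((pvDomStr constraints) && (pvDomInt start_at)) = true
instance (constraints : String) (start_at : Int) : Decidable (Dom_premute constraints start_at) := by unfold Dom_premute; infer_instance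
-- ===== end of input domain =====

-- B replaces A's recursive generator by a level-by-level BFS over a frontier list of
-- strings, expanding one position per generation (objective: alternative).


-- ===== PORT A =====
-- str.replace(old, new, 1) for a ONE-CHARACTER pattern and replacement: replaces the
-- first occurrence of `old`; exact on that sub-domain (the only way A and B use replace).
def pvReplaceFirst : List Char → Char → Char → List Char
  | [], _, _ => []
  | c :: cs, old, new => if c = old then new :: cs else c :: pvReplaceFirst cs old new

-- literal port of A's recursion; `fuel` is only a totality guard (one recursion step
-- consumes one unit; premute supplies more than the recursion depth).
def premuteGo : Nat → List Char → Int → List (List Char)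
  | 0, _, _ => []
  | f + 1, s, i =>
    if (s.length : Int) ≤ i then [s]
    else
      match PySem.List.pyGet? s i with
      | none => []   -- constraints[start_at] raises IndexError: excluded by Pre_
      | some c =>
        if c = '?' then
          premuteGo f (pvReplaceFirst s '?' '#') (i + 1) ++
          premuteGo f (pvReplaceFirst s '?' '_') (i + 1)
        else
          (if c = '.' then premuteGo f (pvReplaceFirst s '.' '_') (i + 1) else []) ++
          (if c = '#' then premuteGo f s (i + 1) else [])

def premute (constraints : String) (start_at : Int) : List String :=
  (premuteGo (((constraints.toList.length : Int) - start_at).toNat + 1)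
      constraints.toList start_at).map String.ofList

-- ===== PORT B =====
-- Source B's `_expand(s, i)`: the ordered children of one frontier string at position i.
def pvExpand (i : Int) (s : List Char) : List (List Char) :=
  match PySem.List.pyGet? s i with
  | none => []   -- s[i] raises IndexError: excluded by Pre_
  | some c =>
    if c = '?' then [pvReplaceFirst s '?' '#', pvReplaceFirst s '?' '_']
    else if c = '.' then [pvReplaceFirst s '.' '_']
    else if c = '#' then [s]
    else []

-- Source B's for-loop over range(start_at, len) as a foldl; the comprehension
-- `[t for s in frontier for t in _expand(s, i)]` is `frontier.flatMap (pvExpand i)`.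
def premute_alt (constraints : String) (start_at : Int) : List String :=
  ((PySem.List.pyRange start_at (constraints.toList.length : Int) 1).foldl
      (fun frontier i => frontier.flatMap (pvExpand i)) [constraints.toList]).map
    String.ofList

-- ===== PRECONDITION & SPEC =====
-- Python A raises IndexError exactly when start_at < -len(constraints) (negative
-- indexing out of range); Pre_ excludes exactly those inputs (B raises there too).
def Pre_premute (constraints : String) (start_at : Int) : Prop :=
  -(constraints.toList.length : Int) ≤ start_at
instance (constraints : String) (start_at : Int) : Decidable (Pre_premute constraints start_at) := by unfold Pre_premute; infer_instance

def pvWitness_premute : String × Int := ("?.#?", 0)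

def Spec_premute (constraints : String) (start_at : Int) (out : List String) : Prop := out = premute_alt constraints start_at
instance (constraints : String) (start_at : Int) (out : List String) : Decidable (Spec_premute constraints start_at out) := by unfold Spec_premute; infer_instance

-- ===== CLAIM (what is proved, stated in full; the proofs are below) =====
def Claim_equal_premute : Prop := ∀ (constraints : String) (start_at : Int), Dom_premute constraints start_at → Pre_premute constraints start_at → Spec_premute constraints start_at (premute constraints start_at)

-- ===== LEMMAS AND PROOFS =====

theorem pvReplaceFirst_length (s : List Char) (o n : Char) :
    (pvReplaceFirst s o n).length = s.length := by
  induction s with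
  | nil => rfl
  | cons c cs ih => simp only [pvReplaceFirst]; split <;> simp [ih]

-- the mathematical DFS tree of leaves that A's recursion enumerates
def pvDfs (s : List Char) (i : Int) : List (List Char) :=
  if (s.length : Int) ≤ i then [s]
  else
    match PySem.List.pyGet? s i with
    | none => []
    | some c =>
      if c = '?' then
        pvDfs (pvReplaceFirst s '?' '#') (i + 1) ++ pvDfs (pvReplaceFirst s '?' '_') (i + 1)
      else
        (if c = '.' then pvDfs (pvReplaceFirst s '.' '_') (i + 1) else []) ++
        (if c = '#' then pvDfs s (i + 1) else [])
  termination_by ((s.length : Int) - i).toNat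
  decreasing_by all_goals (first | (simp only [pvReplaceFirst_length]; omega) | omega)

theorem premuteGo_eq (f : Nat) :
    ∀ (s : List Char) (i : Int), ((s.length : Int) - i).toNat < f → premuteGo f s i = pvDfs s i := by
  induction f with
  | zero => intro s i h; omega
  | succ f ih =>
    intro s i h
    rw [premuteGo, pvDfs]
    by_cases hle : (s.length : Int) ≤ i
    · rw [if_pos hle, if_pos hle]
    · rw [if_neg hle, if_neg hle]
      cases hg : PySem.List.pyGet? s i with
      | none => rfl
      | some c =>
        have hrec : ∀ o n : Char,
            premuteGo f (pvReplaceFirst s o n) (i + 1) = pvDfs (pvReplaceFirst s o n) (i + 1) := by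
          intro o n; exact ih _ _ (by rw [pvReplaceFirst_length]; omega)
        have h4 : premuteGo f s (i + 1) = pvDfs s (i + 1) := ih _ _ (by omega)
        simp only [hrec, h4]

theorem pvExpand_length {s t : List Char} {i : Int} (h : t ∈ pvExpand i s) :
    t.length = s.length := by
  simp only [pvExpand] at h
  cases hg : PySem.List.pyGet? s i with
  | none => simp [hg] at h
  | some c =>
    simp only [hg] at h
    split_ifs at h
    · rcases List.mem_cons.mp h with rfl | h2
      · simp [pvReplaceFirst_length]
      · rw [List.mem_singleton] at h2; subst h2; simp [pvReplaceFirst_length]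
    · rw [List.mem_singleton] at h; subst h; simp [pvReplaceFirst_length]
    · rw [List.mem_singleton] at h; subst h; rfl
    · cases h

-- unfolding pvDfs one level as a flatMap over the children
theorem pvDfs_step (s : List Char) (i : Int) (hlt : i < (s.length : Int)) :
    pvDfs s i = (pvExpand i s).flatMap (fun t => pvDfs t (i + 1)) := by
  rw [pvDfs, if_neg (by omega)]
  unfold pvExpand
  cases hg : PySem.List.pyGet? s i with
  | none => rfl
  | some c =>
    simp only
    by_cases hq : c = '?'
    · simp [hq]
    · by_cases hd : c = '.'
      · simp [hd]
      · by_cases hh : c = '#'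
        · simp [hh]
        · simp [hq, hd, hh]

-- BFS invariant: folding the remaining generations over a frontier whose members all
-- have length n produces exactly the concatenation of the members' DFS leaf lists.
theorem pvBfs_eq (n : Nat) (d : Nat) :
    ∀ (i : Int) (fr : List (List Char)), ((n : Int) - i).toNat = d →
      (∀ s ∈ fr, s.length = n) →
      (PySem.List.pyRange i (n : Int) 1).foldl
          (fun frontier j => frontier.flatMap (pvExpand j)) fr
        = (fr.map (fun s => pvDfs s i)).flatten := by
  induction d with
  | zero =>
    intro i fr hd hlen
    rw [PySem.List.pyRange_one_eq_nil (by omega)]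
    simp only [List.foldl_nil]
    have : ∀ s ∈ fr, pvDfs s i = [s] := by
      intro s hs; rw [pvDfs, if_pos (by rw [hlen s hs]; omega)]
    rw [List.map_congr_left this, ← List.flatMap_def, List.flatMap_singleton']
  | succ d ih =>
    intro i fr hd hlen
    rw [PySem.List.pyRange_one_cons (by omega)]
    simp only [List.foldl_cons]
    rw [ih (i + 1) _ (by omega)
        (by intro t ht
            obtain ⟨s, hs, hts⟩ := List.mem_flatMap.mp ht
            rw [pvExpand_length hts]; exact hlen s hs)]
    have : ∀ s ∈ fr, pvDfs s i = (pvExpand i s).flatMap (fun t => pvDfs t (i + 1)) := by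
      intro s hs; exact pvDfs_step s i (by rw [hlen s hs]; omega)
    rw [List.map_congr_left this]
    simp only [List.map_flatMap, List.flatten_eq_flatMap, List.flatMap_assoc,
      List.flatMap_map, id]

-- ===== VERDICT (by name: the statement is the Claim_ definition above) =====
theorem premute_spec : Claim_equal_premute := by
  intro constraints start_at _ _
  unfold Spec_premute premute premute_alt
  rw [premuteGo_eq _ _ _ (by omega)]
  rw [pvBfs_eq constraints.toList.length (((constraints.toList.length : Int) - start_at).toNat)
      start_at [constraints.toList] rfl (by simp)]
  simp
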